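-- pv_equiv track=rewrite | github.com/mqitao/CS320-2023-Spring | assigns/09/MySolution/Python/assign09_04.py | find_cons2
-- ===== SOURCE A (Python) =====
-- def find_cons2(xs):
--     ret2 = set()
--
--     for li in xs:
--         for i in range(len(li)):
--             if li[i][0] == 2:
--                 ret2.add(li[i][1])
--
--     ret1 = {key: set() for key in ret2}
--     for li in xs:
--         for i in range(len(li)):
--             if li[i][0] == 1 and li[i][1] in ret1:
--                 ret1[li[i][1]].add(i)
--
--     return [ret2, ret1]
-- ===== SOURCE B (Python) =====
-- def find_cons2(xs):
--     ret2 = set()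
--     idx = {}
--     for li in xs:
--         for i, (t, v) in enumerate(li):
--             if t == 2:
--                 ret2.add(v)
--             elif t == 1:
--                 idx.setdefault(v, set()).add(i)
--     ret1 = {key: idx.get(key, set()) for key in ret2}
--     return [ret2, ret1]
-- ===== Notes on version B (the rewrite author's own statement) =====
-- stated objective: simpler
-- what changed: A makes two separate guarded double scans (one to collect type-2 values, one that conditionally updates a pre-keyed dict); B makes a single combined pass that builds the type-2 value set and an unconditional type-1 position index, then projects the index onto the set's keys with a comprehension.
import Mathlib
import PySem

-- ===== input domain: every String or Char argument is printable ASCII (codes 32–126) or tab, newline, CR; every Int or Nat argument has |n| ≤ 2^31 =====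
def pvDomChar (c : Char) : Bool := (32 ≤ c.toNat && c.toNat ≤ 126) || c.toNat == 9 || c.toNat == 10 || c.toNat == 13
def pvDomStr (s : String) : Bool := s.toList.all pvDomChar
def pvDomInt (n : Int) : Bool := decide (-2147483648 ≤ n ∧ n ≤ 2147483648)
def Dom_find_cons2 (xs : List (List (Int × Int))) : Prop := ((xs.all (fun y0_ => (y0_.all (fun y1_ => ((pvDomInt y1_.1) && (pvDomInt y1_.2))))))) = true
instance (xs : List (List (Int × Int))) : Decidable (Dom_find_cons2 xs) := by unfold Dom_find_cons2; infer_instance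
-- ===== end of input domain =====

-- B replaces A's two guarded double scans by one combined pass that builds the type-2 value set and a
-- type-1 position index unconditionally, then projects the index onto the set's keys (objective: simpler).

-- ===== PORT A =====
def find_cons2 (xs : List (List (Int × Int))) : List Int × (List (Int × List Int)) :=
  let ret2 : PySem.Set Int := xs.foldl (fun ret2 li =>
    (PySem.List.pyRange 0 (PySem.List.len li) 1).foldl (fun ret2 i =>
      if (PySem.List.pyGetD li i (0, 0)).1 = 2 then
        PySem.Set.add ret2 (PySem.List.pyGetD li i (0, 0)).2
      else ret2) ret2) PySem.Set.empty
  let ret1init : PySem.Dict Int (PySem.Set Int) :=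
    ret2.foldl (fun d key => d.insert key PySem.Set.empty) PySem.Dict.empty
  let ret1 : PySem.Dict Int (PySem.Set Int) := xs.foldl (fun ret1 li =>
    (PySem.List.pyRange 0 (PySem.List.len li) 1).foldl (fun ret1 i =>
      if (PySem.List.pyGetD li i (0, 0)).1 = 1 ∧ ret1.contains (PySem.List.pyGetD li i (0, 0)).2 = true then
        ret1.modify (PySem.List.pyGetD li i (0, 0)).2 PySem.Set.empty (fun s => PySem.Set.add s i)
      else ret1) ret1) ret1init
  (ret2, ret1.items)

-- ===== PORT B =====
def find_cons2_alt (xs : List (List (Int × Int))) : List Int × (List (Int × List Int)) :=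
  let st : PySem.Set Int × PySem.Dict Int (PySem.Set Int) := xs.foldl (fun st li =>
    (PySem.List.enumerate li).foldl (fun st p =>
      if p.2.1 = 2 then (PySem.Set.add st.1 p.2.2, st.2)
      else if p.2.1 = 1 then
        -- idx.setdefault(v, set()).add(i)  ==  idx[v] = idx.get(v, set()) ∪ {i}, i.e. Dict.modify
        (st.1, st.2.modify p.2.2 PySem.Set.empty (fun s => PySem.Set.add s p.1))
      else st) st) (PySem.Set.empty, PySem.Dict.empty)
  let ret1 : List (Int × List Int) := st.1.map (fun key => (key, st.2.getD key PySem.Set.empty))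
  (st.1, ret1)

-- ===== PRECONDITION & SPEC =====
def Spec_find_cons2 (xs : List (List (Int × Int))) (out : List Int × (List (Int × List Int))) : Prop := out = find_cons2_alt xs
instance (xs : List (List (Int × Int))) (out : List Int × (List (Int × List Int))) : Decidable (Spec_find_cons2 xs out) := by unfold Spec_find_cons2; infer_instance

-- ===== CLAIM (what is proved, stated in full; the proofs are below) =====
def Claim_equal_find_cons2 : Prop := ∀ (xs : List (List (Int × Int))), Dom_find_cons2 xs → Spec_find_cons2 xs (find_cons2 xs)

-- ===== LEMMAS AND PROOFS =====

-- named step functions (proof-side views of the loop bodies above)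
def sStep (r2 : PySem.Set Int) (p : Int × (Int × Int)) : PySem.Set Int :=
  if p.2.1 = 2 then PySem.Set.add r2 p.2.2 else r2

def aStep (d : PySem.Dict Int (PySem.Set Int)) (p : Int × (Int × Int)) : PySem.Dict Int (PySem.Set Int) :=
  if p.2.1 = 1 ∧ d.contains p.2.2 = true then
    d.modify p.2.2 PySem.Set.empty (fun s => PySem.Set.add s p.1) else d

def iStep (d : PySem.Dict Int (PySem.Set Int)) (p : Int × (Int × Int)) : PySem.Dict Int (PySem.Set Int) :=
  if p.2.1 = 2 then d
  else if p.2.1 = 1 then d.modify p.2.2 PySem.Set.empty (fun s => PySem.Set.add s p.1)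
  else d

def bStep (st : PySem.Set Int × PySem.Dict Int (PySem.Set Int)) (p : Int × (Int × Int)) :
    PySem.Set Int × PySem.Dict Int (PySem.Set Int) :=
  if p.2.1 = 2 then (PySem.Set.add st.1 p.2.2, st.2)
  else if p.2.1 = 1 then (st.1, st.2.modify p.2.2 PySem.Set.empty (fun s => PySem.Set.add s p.1))
  else st

def afold2 (xs : List (List (Int × Int))) (init : PySem.Set Int) : PySem.Set Int :=
  xs.foldl (fun a li => (PySem.List.enumerate li).foldl sStep a) init

def afoldA (xs : List (List (Int × Int))) (d : PySem.Dict Int (PySem.Set Int)) : PySem.Dict Int (PySem.Set Int) :=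
  xs.foldl (fun d li => (PySem.List.enumerate li).foldl aStep d) d

def afoldI (xs : List (List (Int × Int))) (d : PySem.Dict Int (PySem.Set Int)) : PySem.Dict Int (PySem.Set Int) :=
  xs.foldl (fun d li => (PySem.List.enumerate li).foldl iStep d) d

def d0 (K : List Int) : PySem.Dict Int (PySem.Set Int) :=
  K.foldl (fun d key => d.insert key PySem.Set.empty) PySem.Dict.empty

lemma A2_inner (li : List (Int × Int)) (init : PySem.Set Int) :
    (PySem.List.pyRange 0 (PySem.List.len li) 1).foldl (fun ret2 i =>
      if (PySem.List.pyGetD li i (0, 0)).1 = 2 then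
        PySem.Set.add ret2 (PySem.List.pyGetD li i (0, 0)).2
      else ret2) init
    = (PySem.List.enumerate li).foldl sStep init := by
  rw [PySem.List.enumerate_eq_map_pyRange li (0, 0), List.foldl_map]
  rfl

lemma A1_inner (li : List (Int × Int)) (d : PySem.Dict Int (PySem.Set Int)) :
    (PySem.List.pyRange 0 (PySem.List.len li) 1).foldl (fun ret1 i =>
      if (PySem.List.pyGetD li i (0, 0)).1 = 1 ∧ ret1.contains (PySem.List.pyGetD li i (0, 0)).2 = true then
        ret1.modify (PySem.List.pyGetD li i (0, 0)).2 PySem.Set.empty (fun s => PySem.Set.add s i)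
      else ret1) d
    = (PySem.List.enumerate li).foldl aStep d := by
  rw [PySem.List.enumerate_eq_map_pyRange li (0, 0), List.foldl_map]
  rfl

lemma outer2 (xs : List (List (Int × Int))) (init : PySem.Set Int) :
    xs.foldl (fun ret2 li =>
      (PySem.List.pyRange 0 (PySem.List.len li) 1).foldl (fun ret2 i =>
        if (PySem.List.pyGetD li i (0, 0)).1 = 2 then
          PySem.Set.add ret2 (PySem.List.pyGetD li i (0, 0)).2
        else ret2) ret2) init = afold2 xs init := by
  unfold afold2
  congr 1
  funext a li
  exact A2_inner li a

lemma outerA (xs : List (List (Int × Int))) (d : PySem.Dict Int (PySem.Set Int)) :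
    xs.foldl (fun ret1 li =>
      (PySem.List.pyRange 0 (PySem.List.len li) 1).foldl (fun ret1 i =>
        if (PySem.List.pyGetD li i (0, 0)).1 = 1 ∧ ret1.contains (PySem.List.pyGetD li i (0, 0)).2 = true then
          ret1.modify (PySem.List.pyGetD li i (0, 0)).2 PySem.Set.empty (fun s => PySem.Set.add s i)
        else ret1) ret1) d = afoldA xs d := by
  unfold afoldA
  congr 1
  funext d li
  exact A1_inner li d

lemma find_cons2_eq (xs : List (List (Int × Int))) :
    find_cons2 xs = (afold2 xs PySem.Set.empty, (afoldA xs (d0 (afold2 xs PySem.Set.empty))).items) := by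
  simp only [find_cons2, outer2, outerA, d0]

lemma bsplit_inner (l : List (Int × (Int × Int))) (a : PySem.Set Int) (b : PySem.Dict Int (PySem.Set Int)) :
    l.foldl bStep (a, b) = (l.foldl sStep a, l.foldl iStep b) := by
  induction l generalizing a b with
  | nil => rfl
  | cons p t ih =>
      have h : bStep (a, b) p = (sStep a p, iStep b p) := by
        unfold bStep sStep iStep
        by_cases h2 : p.2.1 = 2
        · simp [h2]
        · by_cases h1 : p.2.1 = 1
          · simp [h1]
          · simp [h1, h2]
      simp only [List.foldl_cons, h, ih]

lemma bsplit (xs : List (List (Int × Int))) (a : PySem.Set Int) (b : PySem.Dict Int (PySem.Set Int)) :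
    xs.foldl (fun st li => (PySem.List.enumerate li).foldl bStep st) (a, b) = (afold2 xs a, afoldI xs b) := by
  induction xs generalizing a b with
  | nil => rfl
  | cons li t ih => simp only [List.foldl_cons, afold2, afoldI, bsplit_inner, ih]

lemma find_cons2_alt_eq (xs : List (List (Int × Int))) :
    find_cons2_alt xs =
      ((afold2 xs PySem.Set.empty,
        (afold2 xs PySem.Set.empty).map (fun k =>
          (k, (afoldI xs PySem.Dict.empty).getD k PySem.Set.empty))) :
        List Int × List (Int × List Int)) := by
  have h : find_cons2_alt xs =
      (let st := xs.foldl (fun st li => (PySem.List.enumerate li).foldl bStep st)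
         ((PySem.Set.empty : PySem.Set Int), (PySem.Dict.empty : PySem.Dict Int (PySem.Set Int)));
       (st.1, st.1.map (fun key => (key, st.2.getD key PySem.Set.empty)))) := rfl
  rw [h]
  rw [bsplit]

lemma nodup_sfold (l : List (Int × (Int × Int))) (s : PySem.Set Int) (h : s.Nodup) :
    (l.foldl sStep s).Nodup := by
  induction l generalizing s with
  | nil => exact h
  | cons p t ih =>
      refine ih _ ?_
      unfold sStep
      split_ifs
      · exact PySem.Set.nodup_add _ _ h
      · exact h

lemma nodup_afold2 (xs : List (List (Int × Int))) (s : PySem.Set Int) (h : s.Nodup) :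
    (afold2 xs s).Nodup := by
  induction xs generalizing s with
  | nil => exact h
  | cons li t ih => exact ih _ (nodup_sfold _ _ h)

lemma keys_aStep (d : PySem.Dict Int (PySem.Set Int)) (p : Int × (Int × Int)) :
    (aStep d p).keys = d.keys := by
  unfold aStep
  split_ifs with h
  · rw [PySem.Dict.keys_modify, PySem.Dict.keys_insert_of_contains _ _ h.2]
  · rfl

lemma keys_afoldA_inner (l : List (Int × (Int × Int))) (d : PySem.Dict Int (PySem.Set Int)) :
    (l.foldl aStep d).keys = d.keys := by
  induction l generalizing d with
  | nil => rfl
  | cons p t ih => rw [List.foldl_cons, ih, keys_aStep]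

lemma keys_afoldA (xs : List (List (Int × Int))) (d : PySem.Dict Int (PySem.Set Int)) :
    (afoldA xs d).keys = d.keys := by
  induction xs generalizing d with
  | nil => rfl
  | cons li t ih => unfold afoldA at *; rw [List.foldl_cons, ih, keys_afoldA_inner]

lemma G_step (d d' : PySem.Dict Int (PySem.Set Int)) (p : Int × (Int × Int)) (k : Int)
    (hc : d.contains k = true)
    (hv : d.getD k PySem.Set.empty = d'.getD k PySem.Set.empty) :
    (aStep d p).contains k = true ∧
      (aStep d p).getD k PySem.Set.empty = (iStep d' p).getD k PySem.Set.empty := by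
  unfold aStep iStep
  by_cases h1 : p.2.1 = 1
  · have h2 : ¬ p.2.1 = 2 := by omega
    by_cases hcv : d.contains p.2.2 = true
    · rw [if_pos ⟨h1, hcv⟩, if_neg h2, if_pos h1]
      by_cases hvk : p.2.2 = k
      · subst hvk
        refine ⟨?_, ?_⟩
        · rw [PySem.Dict.contains_modify]
          simp [hc]
        · rw [PySem.Dict.getD_modify, PySem.Dict.getD_modify, if_pos rfl, if_pos rfl, hv]
      · have hkv : ¬ k = p.2.2 := fun h => hvk h.symm
        refine ⟨?_, ?_⟩
        · rw [PySem.Dict.contains_modify]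
          simp [hc]
        · rw [PySem.Dict.getD_modify, PySem.Dict.getD_modify, if_neg hkv, if_neg hkv]
          exact hv
    · rw [if_neg (fun h => hcv h.2), if_neg h2, if_pos h1]
      have hkv : ¬ k = p.2.2 := by
        intro h
        subst h
        exact hcv hc
      refine ⟨hc, ?_⟩
      rw [PySem.Dict.getD_modify, if_neg hkv]
      exact hv
  · have hna : ¬ (p.2.1 = 1 ∧ d.contains p.2.2 = true) := fun h => h1 h.1
    rw [if_neg hna]
    by_cases h2 : p.2.1 = 2
    · rw [if_pos h2]
      exact ⟨hc, hv⟩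
    · rw [if_neg h2, if_neg h1]
      exact ⟨hc, hv⟩

lemma G_fold (l : List (Int × (Int × Int))) (d d' : PySem.Dict Int (PySem.Set Int)) (k : Int)
    (hc : d.contains k = true)
    (hv : d.getD k PySem.Set.empty = d'.getD k PySem.Set.empty) :
    (l.foldl aStep d).contains k = true ∧
      (l.foldl aStep d).getD k PySem.Set.empty = (l.foldl iStep d').getD k PySem.Set.empty := by
  induction l generalizing d d' with
  | nil => exact ⟨hc, hv⟩
  | cons p t ih =>
      obtain ⟨hc', hv'⟩ := G_step d d' p k hc hv
      exact ih _ _ hc' hv'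

lemma G_big (xs : List (List (Int × Int))) (d d' : PySem.Dict Int (PySem.Set Int)) (k : Int)
    (hc : d.contains k = true)
    (hv : d.getD k PySem.Set.empty = d'.getD k PySem.Set.empty) :
    (afoldA xs d).contains k = true ∧
      (afoldA xs d).getD k PySem.Set.empty = (afoldI xs d').getD k PySem.Set.empty := by
  induction xs generalizing d d' with
  | nil => exact ⟨hc, hv⟩
  | cons li t ih =>
      obtain ⟨hc', hv'⟩ := G_fold (PySem.List.enumerate li) d d' k hc hv
      exact ih _ _ hc' hv'

lemma upd_nil_aux (K : List Int) : ∀ (s : PySem.Set Int), K.Nodup → (∀ x ∈ K, x ∉ s) →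
    PySem.Set.update s K = s ++ K := by
  induction K with
  | nil => intro s _ _; simp [PySem.Set.update]
  | cons a t ih =>
      intro s hnd hdisj
      have ha : a ∉ s := hdisj a (by simp)
      have : PySem.Set.update s (a :: t) = PySem.Set.update (s.add a) t := rfl
      rw [this, PySem.Set.add_of_not_mem ha, ih _ (List.nodup_cons.mp hnd).2 ?_]
      · simp
      · intro x hx
        simp only [List.mem_append, List.mem_singleton]
        rintro (h | h)
        · exact hdisj x (by simp [hx]) h
        · exact (List.nodup_cons.mp hnd).1 (h ▸ hx)

lemma keys_d0 (K : List Int) (h : K.Nodup) : (d0 K).keys = K := by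
  have hk := PySem.Dict.keys_foldl_insert K (fun _ _ => (PySem.Set.empty : PySem.Set Int)) PySem.Dict.empty
  unfold d0
  rw [hk, PySem.Dict.keys_empty]
  simpa using upd_nil_aux K [] h (by simp)

lemma getD_d0 (K : List Int) (k : Int) : (d0 K).getD k PySem.Set.empty = PySem.Set.empty := by
  unfold d0
  have : ∀ (d : PySem.Dict Int (PySem.Set Int)), d.getD k PySem.Set.empty = PySem.Set.empty →
      (K.foldl (fun d key => d.insert key PySem.Set.empty) d).getD k PySem.Set.empty = PySem.Set.empty := by
    induction K with
    | nil => intro d hd; exact hd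
    | cons a t ih =>
        intro d hd
        rw [List.foldl_cons]
        refine ih _ ?_
        rw [PySem.Dict.getD_insert]
        by_cases h : k = a
        · rw [if_pos h]
        · rw [if_neg h]
          exact hd
  exact this _ (PySem.Dict.getD_empty _ _)

-- ===== VERDICT (by name: the statement is the Claim_ definition above) =====
theorem find_cons2_spec : Claim_equal_find_cons2 := by
  intro xs _
  unfold Spec_find_cons2
  rw [find_cons2_eq, find_cons2_alt_eq]
  have hnd : (afold2 xs PySem.Set.empty).Nodup := nodup_afold2 xs _ List.nodup_nil
  have hkeysd0 : (d0 (afold2 xs PySem.Set.empty)).keys = afold2 xs PySem.Set.empty := keys_d0 _ hnd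
  have hkeys : (afoldA xs (d0 (afold2 xs PySem.Set.empty))).keys = afold2 xs PySem.Set.empty := by
    rw [keys_afoldA, hkeysd0]
  have hndA : (afoldA xs (d0 (afold2 xs PySem.Set.empty))).keys.Nodup := by
    rw [hkeys]
    exact hnd
  rw [PySem.Dict.items_eq_map_keys _ hndA PySem.Set.empty, hkeys]
  congr 1
  refine List.map_congr_left ?_
  intro k hkmem
  have hc : (d0 (afold2 xs PySem.Set.empty)).contains k = true := by
    rw [PySem.Dict.contains_iff_mem_keys, hkeysd0]
    exact hkmem
  have hv : (d0 (afold2 xs PySem.Set.empty)).getD k PySem.Set.empty =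
      (PySem.Dict.empty : PySem.Dict Int (PySem.Set Int)).getD k PySem.Set.empty := by
    rw [getD_d0, PySem.Dict.getD_empty]
  exact congrArg (fun v => (k, v)) (G_big xs (d0 (afold2 xs PySem.Set.empty)) PySem.Dict.empty k hc hv).2
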